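-- pv_equiv track=rewrite | github.com/ianno/pycolite | pycolite/formula.py | find_precedence_index
-- ===== SOURCE A (Python) =====
-- PRECEDENCE_TUPLE = (
--     ('left', 'IMPLICATION'),
--     ('left', 'AND', 'OR'),
--     ('left', 'UNTIL', 'RELEASE', 'WEAK_UNTIL'),
--     ('right', 'GLOBALLY', 'EVENTUALLY'),
--     ('left', 'GE', 'GEQ', 'LE', 'LEQ', 'EQUALITY'),
--     ('left', 'ADD', 'SUB'),
--     ('left', 'MUL', 'DIV'),
--     ('right', 'NOT', 'NEXT'),
-- )
--
-- class NotFoundError(Exception):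
--     '''
--     doc
--     '''
--     pass
--
-- def find_precedence_index(symbol, precedence_tuple=None):
--     '''
--     doc
--     '''
--     if precedence_tuple == None:
--         precedence_tuple = PRECEDENCE_TUPLE
--
--     for i in range(0, len(precedence_tuple)):
--         if symbol in precedence_tuple[i]:
--             direction = precedence_tuple[i][0]
--             return i, direction
--     raise NotFoundError
-- ===== SOURCE B (Python) =====
-- PRECEDENCE_TUPLE = (
--     ('left', 'IMPLICATION'),
--     ('left', 'AND', 'OR'),
--     ('left', 'UNTIL', 'RELEASE', 'WEAK_UNTIL'),
--     ('right', 'GLOBALLY', 'EVENTUALLY'),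
--     ('left', 'GE', 'GEQ', 'LE', 'LEQ', 'EQUALITY'),
--     ('left', 'ADD', 'SUB'),
--     ('left', 'MUL', 'DIV'),
--     ('right', 'NOT', 'NEXT'),
-- )
--
-- class NotFoundError(Exception):
--     pass
--
-- def find_precedence_index(symbol, precedence_tuple=None):
--     if precedence_tuple == None:
--         precedence_tuple = PRECEDENCE_TUPLE
--     index = {}
--     for i, group in enumerate(precedence_tuple):
--         for sym in group:
--             index.setdefault(sym, (i, group[0]))
--     try:
--         return index[symbol]
--     except KeyError:
--         raise NotFoundError
-- ===== Notes on version B (the rewrite author's own statement) =====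
-- stated objective: idiomatic
-- what changed: B builds a dict index once (setdefault keeps the first occurrence, and registers the leading direction strings too) and answers with a single lookup, instead of A's linear scan over the rows with an inner membership test.
import Mathlib
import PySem

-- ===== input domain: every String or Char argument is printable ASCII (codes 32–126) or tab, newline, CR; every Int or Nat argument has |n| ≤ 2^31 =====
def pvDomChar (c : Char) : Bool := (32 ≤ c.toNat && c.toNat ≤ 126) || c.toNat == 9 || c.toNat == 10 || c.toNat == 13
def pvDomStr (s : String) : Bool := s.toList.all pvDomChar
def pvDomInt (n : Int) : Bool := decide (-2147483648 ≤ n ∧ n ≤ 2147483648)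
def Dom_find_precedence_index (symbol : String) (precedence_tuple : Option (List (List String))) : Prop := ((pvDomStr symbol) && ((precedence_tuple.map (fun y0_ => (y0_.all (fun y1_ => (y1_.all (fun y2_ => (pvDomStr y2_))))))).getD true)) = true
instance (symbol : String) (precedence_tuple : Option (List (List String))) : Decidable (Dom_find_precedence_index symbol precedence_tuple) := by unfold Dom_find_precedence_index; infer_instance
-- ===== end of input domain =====

-- B replaces A's linear scan by a dict index built once with first-occurrence (setdefault) semantics; equivalence proved on inputs where A returns (symbol found).


def pvDefaultPrecedence : List (List String) :=
  [["left", "IMPLICATION"],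
   ["left", "AND", "OR"],
   ["left", "UNTIL", "RELEASE", "WEAK_UNTIL"],
   ["right", "GLOBALLY", "EVENTUALLY"],
   ["left", "GE", "GEQ", "LE", "LEQ", "EQUALITY"],
   ["left", "ADD", "SUB"],
   ["left", "MUL", "DIV"],
   ["right", "NOT", "NEXT"]]

-- ===== PORT A =====
-- A's loop 'for i in range(len(pt)): if symbol in pt[i]: return i, pt[i][0]' as structural
-- recursion over the rows carrying the index i; 'none' = the NotFoundError raise.
def fpiScanA (symbol : String) (rows : List (List String)) (i : Int) : Option (Int × String) :=
  match rows with
  | [] => none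
  | row :: rest =>
    if symbol ∈ row then (PySem.List.pyGet? row 0).map (fun d => (i, d))
    else fpiScanA symbol rest (i + 1)

def find_precedence_index (symbol : String) (precedence_tuple : Option (List (List String))) : Int × String :=
  let pt := precedence_tuple.getD pvDefaultPrecedence
  (fpiScanA symbol pt 0).getD (0, "")  -- none only outside Pre_ (A raises NotFoundError there)

-- ===== PORT B =====
-- B: build the index dict with setdefault over enumerate(pt), then one lookup.
def fpiIndex (pt : List (List String)) : PySem.Dict String (Int × String) :=
  (PySem.List.enumerate pt).foldl
    (fun d p => p.2.foldl (fun d sym => d.setdefault sym (p.1, (PySem.List.pyGet? p.2 0).getD "")) d)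
    PySem.Dict.empty

def find_precedence_index_alt (symbol : String) (precedence_tuple : Option (List (List String))) : Int × String :=
  let pt := precedence_tuple.getD pvDefaultPrecedence
  ((fpiIndex pt).get? symbol).getD (0, "")  -- none only outside Pre_ (B raises NotFoundError there)

-- ===== PRECONDITION & SPEC =====
-- A (and B) raise NotFoundError when symbol occurs in no row; Pre_ excludes exactly those inputs.
def Pre_find_precedence_index (symbol : String) (precedence_tuple : Option (List (List String))) : Prop :=
  (precedence_tuple.getD pvDefaultPrecedence).any (fun row => row.contains symbol) = true
instance (symbol : String) (precedence_tuple : Option (List (List String))) : Decidable (Pre_find_precedence_index symbol precedence_tuple) := by unfold Pre_find_precedence_index; infer_instance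
def pvWitness_find_precedence_index : String × Option (List (List String)) := ("AND", none)

def Spec_find_precedence_index (symbol : String) (precedence_tuple : Option (List (List String))) (out : Int × String) : Prop := out = find_precedence_index_alt symbol precedence_tuple
instance (symbol : String) (precedence_tuple : Option (List (List String))) (out : Int × String) : Decidable (Spec_find_precedence_index symbol precedence_tuple out) := by unfold Spec_find_precedence_index; infer_instance

-- ===== CLAIM (what is proved, stated in full; the proofs are below) =====
def Claim_equal_find_precedence_index : Prop := ∀ (symbol : String) (precedence_tuple : Option (List (List String))), Dom_find_precedence_index symbol precedence_tuple → Pre_find_precedence_index symbol precedence_tuple → Spec_find_precedence_index symbol precedence_tuple (find_precedence_index symbol precedence_tuple)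

-- ===== LEMMAS AND PROOFS =====

-- setdefault over one row: the lookup afterwards is the old binding, else (i, v) if symbol is in the row.
theorem fpi_row_get? (symbol : String) (row : List String) (v : Int × String)
    (d : PySem.Dict String (Int × String)) :
    (row.foldl (fun d sym => d.setdefault sym v) d).get? symbol =
      (d.get? symbol).or (if symbol ∈ row then some v else none) := by
  induction row generalizing d with
  | nil => simp
  | cons sym rest ih =>
    simp only [List.foldl_cons, ih]
    by_cases hs : symbol = sym
    · subst hs
      rw [PySem.Dict.get?_setdefault_self]
      cases h : d.get? symbol <;> simp
    · have hget : (d.setdefault sym v).get? symbol = d.get? symbol := by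
        by_cases hc : d.contains sym = true
        · rw [PySem.Dict.setdefault_of_contains _ _ hc]
        · rw [PySem.Dict.setdefault_of_not_contains _ _ (by simpa using hc),
            PySem.Dict.get?_insert_of_ne _ _ hs]
      rw [hget]
      simp [List.mem_cons, hs]

-- building over the enumerated rows: the lookup afterwards equals A's scan (first row wins).
theorem fpi_build_get? (symbol : String) (pt : List (List String)) (i : Int)
    (d : PySem.Dict String (Int × String)) :
    ((PySem.List.enumerate pt i).foldl
        (fun d p => p.2.foldl (fun d sym => d.setdefault sym (p.1, (PySem.List.pyGet? p.2 0).getD "")) d) d).get? symbol =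
      (d.get? symbol).or (fpiScanA symbol pt i) := by
  induction pt generalizing i d with
  | nil => simp [PySem.List.enumerate_nil, fpiScanA]
  | cons row rest ih =>
    rw [PySem.List.enumerate_cons, List.foldl_cons, ih,
      fpi_row_get? symbol row ((i : Int), (PySem.List.pyGet? row 0).getD "")]
    simp only [fpiScanA]
    by_cases hm : symbol ∈ row
    · cases h : d.get? symbol <;>
        cases row <;> simp_all [PySem.List.pyGet?, PySem.List.pyIdx?]
    · cases h : d.get? symbol <;> simp [hm]

theorem fpi_get?_eq (symbol : String) (pt : List (List String)) :
    (fpiIndex pt).get? symbol = fpiScanA symbol pt 0 := by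
  unfold fpiIndex
  rw [fpi_build_get?]
  simp

-- ===== VERDICT (by name: the statement is the Claim_ definition above) =====
theorem find_precedence_index_spec : Claim_equal_find_precedence_index := by
  intro symbol precedence_tuple _ _
  simp only [Spec_find_precedence_index, find_precedence_index, find_precedence_index_alt,
    fpi_get?_eq]
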